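-- pv_equiv track=rewrite | github.com/waybarrios/vllm-mlx | tests/test_spec_decode_integration.py | _emit_tokens
-- ===== SOURCE A (Python) =====
-- def _emit_tokens(accepted_tokens, stop_tokens, tokens_remaining):
--     """Replicate the stop/max-token clipping logic from _step_spec_decode."""
--     emitted = []
--     rollback = 0
--     for t_idx, token in enumerate(accepted_tokens):
--         if tokens_remaining <= 0:
--             unemitted = len(accepted_tokens) - t_idx
--             rollback += unemitted
--             break
--         finish_reason = None
--         if token in stop_tokens:
--             finish_reason = "stop"
--         elif tokens_remaining == 1:
--             finish_reason = "length"
--         emitted.append((token, finish_reason))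
--         tokens_remaining -= 1
--         if finish_reason is not None:
--             unemitted = len(accepted_tokens) - t_idx - 1
--             if unemitted > 0:
--                 rollback += unemitted
--             break
--     return emitted, rollback
-- ===== SOURCE B (Python) =====
-- def _emit_tokens(accepted_tokens, stop_tokens, tokens_remaining):
--     """Clip-and-label in one shot: early return, find first stop in the
--     emittable prefix, then build the emitted list; rollback = leftover count."""
--     n = len(accepted_tokens)
--     if tokens_remaining <= 0:
--         return [], n
--     limit = min(n, tokens_remaining)
--     prefix = accepted_tokens[:limit]
--     stop_set = set(stop_tokens)
--     stop_idx = next((j for j, t in enumerate(prefix) if t in stop_set), None)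
--     if stop_idx is not None:
--         emitted = [(t, None) for t in prefix[:stop_idx]] + [(prefix[stop_idx], "stop")]
--     else:
--         emitted = [(t, None) for t in prefix]
--         if tokens_remaining <= n:
--             emitted[-1] = (emitted[-1][0], "length")
--     return emitted, n - len(emitted)
-- ===== Notes on version B (the rewrite author's own statement) =====
-- stated objective: alternative
-- what changed: Replaces A's fused per-token loop (which interleaves emission, stop/length labelling, countdown and per-index rollback arithmetic) with a direct construction: early return for tokens_remaining <= 0, compute the emittable prefix accepted_tokens[:min(n, tokens_remaining)], find the first stop token in it, build the emitted list in one shot and derive rollback as n - len(emitted).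
import Mathlib
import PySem

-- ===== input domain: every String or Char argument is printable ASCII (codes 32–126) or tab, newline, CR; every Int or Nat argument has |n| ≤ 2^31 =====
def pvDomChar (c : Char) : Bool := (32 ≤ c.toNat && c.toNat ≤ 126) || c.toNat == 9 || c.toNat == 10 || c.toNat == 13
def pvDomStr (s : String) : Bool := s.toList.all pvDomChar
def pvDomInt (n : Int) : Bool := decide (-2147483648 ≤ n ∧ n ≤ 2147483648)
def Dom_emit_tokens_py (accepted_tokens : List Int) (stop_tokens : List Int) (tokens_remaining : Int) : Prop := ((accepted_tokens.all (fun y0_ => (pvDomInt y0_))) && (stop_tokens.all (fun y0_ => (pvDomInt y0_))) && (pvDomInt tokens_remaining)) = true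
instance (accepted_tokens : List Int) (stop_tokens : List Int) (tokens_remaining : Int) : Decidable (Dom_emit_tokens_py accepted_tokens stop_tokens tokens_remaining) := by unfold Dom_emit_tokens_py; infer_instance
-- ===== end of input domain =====

-- B replaces A's fused emit/rollback loop with: early return, one scan for the
-- first stop in the emittable prefix, then direct construction (objective: alternative).

-- ===== PORT A =====
-- the for-loop of _emit_tokens; n = len(accepted_tokens), args: remaining list, t_idx, tokens_remaining
def emitLoopA (stop_tokens : List Int) (n : Int) : List Int → Int → Int → (List (Int × Option String)) × Int
  | [], _, _ => ([], 0)
  | token :: rest, t_idx, tokens_remaining =>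
    if tokens_remaining ≤ 0 then
      ([], n - t_idx)   -- rollback += len - t_idx; break
    else
      let finish_reason : Option String :=
        if stop_tokens.contains token then some "stop"
        else if tokens_remaining = 1 then some "length" else none
      match finish_reason with
      | some r =>
          let unemitted := n - t_idx - 1
          ([(token, some r)], if unemitted > 0 then unemitted else 0)   -- append then break
      | none =>
          let res := emitLoopA stop_tokens n rest (t_idx + 1) (tokens_remaining - 1)
          ((token, none) :: res.1, res.2)

def emit_tokens_py (accepted_tokens : List Int) (stop_tokens : List Int) (tokens_remaining : Int) : (List (Int × Option String)) × Int :=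
  emitLoopA stop_tokens (accepted_tokens.length : Int) accepted_tokens 0 tokens_remaining

-- ===== PORT B =====
-- port of the in-place update emitted[-1] = (emitted[-1][0], "length")
def setLastLength : List (Int × Option String) → List (Int × Option String)
  | [] => []
  | [(t, _)] => [(t, some "length")]
  | x :: rest => x :: setLastLength rest

-- B's non-early-return branch (tokens_remaining > 0)
def emitBodyB (accepted_tokens : List Int) (stop_tokens : List Int) (tokens_remaining : Int) : (List (Int × Option String)) × Int :=
  let n : Int := accepted_tokens.length
  let limit : Int := min n tokens_remaining
  let pfx := accepted_tokens.take limit.toNat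
  match pfx.findIdx? (fun t => stop_tokens.contains t) with
  | some j =>
      let emitted := (pfx.take j).map (fun t => (t, (none : Option String))) ++ [(pfx.getD j 0, some "stop")]
      (emitted, n - emitted.length)
  | none =>
      let emitted0 := pfx.map (fun t => (t, (none : Option String)))
      let emitted := if tokens_remaining ≤ n then setLastLength emitted0 else emitted0
      (emitted, n - emitted.length)

def emit_tokens_py_alt (accepted_tokens : List Int) (stop_tokens : List Int) (tokens_remaining : Int) : (List (Int × Option String)) × Int :=
  if tokens_remaining ≤ 0 then ([], (accepted_tokens.length : Int))
  else emitBodyB accepted_tokens stop_tokens tokens_remaining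

-- ===== PRECONDITION & SPEC =====
def Spec_emit_tokens_py (accepted_tokens : List Int) (stop_tokens : List Int) (tokens_remaining : Int) (out : (List (Int × Option String)) × Int) : Prop := out = emit_tokens_py_alt accepted_tokens stop_tokens tokens_remaining
instance (accepted_tokens : List Int) (stop_tokens : List Int) (tokens_remaining : Int) (out : (List (Int × Option String)) × Int) : Decidable (Spec_emit_tokens_py accepted_tokens stop_tokens tokens_remaining out) := by unfold Spec_emit_tokens_py; infer_instance

-- ===== CLAIM (what is proved, stated in full; the proofs are below) =====
def Claim_equal_emit_tokens_py : Prop := ∀ (accepted_tokens : List Int) (stop_tokens : List Int) (tokens_remaining : Int), Dom_emit_tokens_py accepted_tokens stop_tokens tokens_remaining → Spec_emit_tokens_py accepted_tokens stop_tokens tokens_remaining (emit_tokens_py accepted_tokens stop_tokens tokens_remaining)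

-- ===== LEMMAS AND PROOFS =====

lemma setLastLength_cons (x : Int × Option String) (l : List (Int × Option String)) (h : l ≠ []) :
    setLastLength (x :: l) = x :: setLastLength l := by
  cases l with
  | nil => exact absurd rfl h
  | cons y ys => rfl

lemma length_setLastLength (l : List (Int × Option String)) :
    (setLastLength l).length = l.length := by
  induction l with
  | nil => rfl
  | cons x rest ih =>
      cases rest with
      | nil => obtain ⟨a, b⟩ := x; rfl
      | cons y ys => rw [setLastLength_cons x (y :: ys) (by simp)]; simpa using ih

lemma loopA_le_zero (stop : List Int) (rest : List Int) (tr idx n : Int)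
    (hn : n = idx + rest.length) (htr : tr ≤ 0) :
    emitLoopA stop n rest idx tr = ([], (rest.length : Int)) := by
  subst hn
  cases rest with
  | nil => simp [emitLoopA]
  | cons t rs => simp [emitLoopA, htr]

lemma emitBodyB_cons (token : Int) (rest stop : List Int) (tr : Int)
    (hc : stop.contains token = false) (htr : 2 ≤ tr) :
    emitBodyB (token :: rest) stop tr =
      ((token, none) :: (emitBodyB rest stop (tr - 1)).1, (emitBodyB rest stop (tr - 1)).2) := by
  have hlim : (min ((token :: rest).length : Int) tr).toNat
      = (min ((rest.length : Int)) (tr - 1)).toNat + 1 := by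
    simp only [List.length_cons]; omega
  unfold emitBodyB
  simp only [hlim, List.take_succ_cons, List.findIdx?_cons, hc, Bool.false_eq_true, if_false]
  cases hfi : (rest.take (min ((rest.length : Int)) (tr - 1)).toNat).findIdx?
      (fun t => stop.contains t) with
  | some j =>
      simp only [Option.map_some, List.take_succ_cons, List.map_cons, List.getD_cons_succ,
        List.cons_append, List.length_cons, List.length_append, List.length_map, List.length_take]
      rw [Prod.mk.injEq]; refine ⟨rfl, ?_⟩
      push_cast
      ring
  | none =>
      simp only [hfi, Option.map_none, List.map_cons]
      split_ifs with h1 h2 h2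
      · have hne' : (rest.take (min ((rest.length : Int)) (tr - 1)).toNat).map
            (fun t => (t, (none : Option String))) ≠ [] := by
          simp only [ne_eq, List.map_eq_nil_iff, List.take_eq_nil_iff]
          push Not
          constructor
          · simp only [List.length_cons] at h1; omega
          · intro hrest; rw [hrest] at h2; simp at h2; omega
        rw [setLastLength_cons _ _ hne']
        rw [Prod.mk.injEq]; refine ⟨rfl, ?_⟩
        simp only [List.length_cons, length_setLastLength, List.length_map, List.length_take]
        push_cast; ring
      · exfalso; simp only [List.length_cons] at h1; omega
      · exfalso; simp only [List.length_cons] at h1; omega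
      · rw [Prod.mk.injEq]; refine ⟨rfl, ?_⟩
        simp only [List.length_cons, List.length_map, List.length_take]
        push_cast; ring

lemma loopA_eq_body (stop : List Int) : ∀ (rest : List Int) (tr idx n : Int),
    n = idx + rest.length → 1 ≤ tr →
    emitLoopA stop n rest idx tr = emitBodyB rest stop tr := by
  intro rest
  induction rest with
  | nil =>
      intro tr idx n hn htr
      simp [emitLoopA, emitBodyB, show ¬ tr ≤ 0 by omega, show min (0:Int) tr = 0 by omega]
  | cons token rs ih =>
      intro tr idx n hn htr
      rw [show emitLoopA stop n (token :: rs) idx tr =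
        (if tr ≤ 0 then ([], n - idx)
         else
          let finish_reason : Option String :=
            if stop.contains token then some "stop"
            else if tr = 1 then some "length" else none
          match finish_reason with
          | some r => ([(token, some r)], if n - idx - 1 > 0 then n - idx - 1 else 0)
          | none =>
            let res := emitLoopA stop n rs (idx + 1) (tr - 1)
            ((token, none) :: res.1, res.2)) from rfl]
      rw [if_neg (by omega)]
      by_cases hc : stop.contains token
      · -- stop fires
        simp only [hc, if_true]
        unfold emitBodyB
        have hlim : (min (((rs.length + 1 : ℕ)) : Int) tr).toNat
            = (min ((rs.length : Int)) (tr - 1)).toNat + 1 := by omega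
        simp only [List.length_cons, hlim, List.take_succ_cons, List.findIdx?_cons, hc, if_true,
          List.take_zero, List.map_nil, List.nil_append, List.getD_cons_zero,
          List.length_append, List.length_map, List.length_take, List.length_nil,
          List.length_singleton]
        rw [Prod.mk.injEq]; refine ⟨rfl, ?_⟩
        simp only [List.length_cons] at hn
        split_ifs <;> omega
      · have hc' : stop.contains token = false := by simpa using hc
        by_cases h1 : tr = 1
        · -- length fires
          subst h1
          simp only [hc', Bool.false_eq_true, if_false, eq_self_iff_true, if_true]
          unfold emitBodyB
          have hlim : (min (((rs.length + 1 : ℕ)) : Int) (1:Int)).toNat = 1 := by omega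
          simp only [List.length_cons, hlim, List.take_succ_cons, List.take_zero,
            List.findIdx?_cons, hc', Bool.false_eq_true, if_false, List.findIdx?_nil,
            Option.map_none, List.map_cons, List.map_nil]
          rw [if_pos (by omega : (1:Int) ≤ ((rs.length + 1 : ℕ) : Int))]
          rw [show setLastLength [(token, none)] = [(token, some "length")] from rfl]
          rw [Prod.mk.injEq]; refine ⟨rfl, ?_⟩
          simp only [List.length_cons] at hn
          simp only [List.length_singleton]
          split_ifs <;> omega
        · -- continue
          simp only [hc', Bool.false_eq_true, if_false, if_neg h1]
          rw [emitBodyB_cons token rs stop tr hc' (by omega)]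
          rw [ih (tr - 1) (idx + 1) n
            (by simp only [List.length_cons] at hn; omega) (by omega)]

-- ===== VERDICT (by name: the statement is the Claim_ definition above) =====
theorem emit_tokens_py_spec : Claim_equal_emit_tokens_py := by
  intro a s tr _
  unfold Spec_emit_tokens_py emit_tokens_py emit_tokens_py_alt
  by_cases h : tr ≤ 0
  · rw [loopA_le_zero s a tr 0 (a.length : Int) (by simp) h]
    rw [if_pos h]
  · rw [loopA_eq_body s a tr 0 (a.length : Int) (by simp) (by omega)]
    rw [if_neg h]
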